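-- pv_equiv track=rewrite | github.com/slalit360/scalar_practice | DSA_ADV/Bit/interesting_array.py | solve
-- ===== SOURCE A (Python) =====
-- def solve(A):
--     ans = 0
--     for i in A:
--         ans ^= i
--     if ans & 1 == 0:  # check for even
--         return 'Yes'
--     else:
--         return 'No'
-- ===== SOURCE B (Python) =====
-- def solve(A):
--     odd = 0
--     for i in A:
--         if i & 1:
--             odd += 1
--     return 'Yes' if odd % 2 == 0 else 'No'
-- ===== Notes on version B (the rewrite author's own statement) =====
-- stated objective: alternative
-- what changed: B counts odd elements and tests the count's parity instead of XOR-accumulating the values and testing the accumulator's low bit.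
import Mathlib
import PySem

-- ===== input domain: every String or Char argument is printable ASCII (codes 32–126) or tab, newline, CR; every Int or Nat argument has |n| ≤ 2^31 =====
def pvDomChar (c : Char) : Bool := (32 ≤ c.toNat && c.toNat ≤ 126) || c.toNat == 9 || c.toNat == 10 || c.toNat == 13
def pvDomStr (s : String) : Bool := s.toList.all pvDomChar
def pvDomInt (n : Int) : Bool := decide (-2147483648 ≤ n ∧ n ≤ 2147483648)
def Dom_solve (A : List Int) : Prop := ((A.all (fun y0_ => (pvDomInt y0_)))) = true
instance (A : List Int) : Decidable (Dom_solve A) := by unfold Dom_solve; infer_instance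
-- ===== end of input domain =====

-- B replaces A's XOR accumulator with a count of odd elements and tests the count's parity (alternative decomposition, same cost).

-- ===== PORT A =====
def solve (A : List Int) : String :=
  let ans := A.foldl (fun ans i => PySem.Int.bxor ans i) 0
  if PySem.Int.band ans 1 = 0 then "Yes" else "No"

-- ===== PORT B =====
def solve_alt (A : List Int) : String :=
  let odd := A.foldl (fun odd i => if PySem.Int.band i 1 ≠ 0 then odd + 1 else odd) (0 : Int)
  if PySem.Int.mod odd 2 = 0 then "Yes" else "No"

-- ===== PRECONDITION & SPEC =====
def Spec_solve (A : List Int) (out : String) : Prop := out = solve_alt A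
instance (A : List Int) (out : String) : Decidable (Spec_solve A out) := by unfold Spec_solve; infer_instance

-- ===== CLAIM (what is proved, stated in full; the proofs are below) =====
def Claim_equal_solve : Prop := ∀ (A : List Int), Dom_solve A → Spec_solve A (solve A)

-- ===== LEMMAS AND PROOFS =====

theorem fmod_two (a : Int) : PySem.Int.mod a 2 = a % 2 := by
  simp [PySem.Int.mod, Int.fmod_eq_emod]

theorem bxor_par (a b : Int) : (PySem.Int.bxor a b) % 2 = (a + b) % 2 := by
  unfold PySem.Int.bxor
  split_ifs with h1 h2 h2
  · have hp := @Nat.xor_mod_two_eq a.toNat b.toNat; omega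
  · have hp := @Nat.xor_mod_two_eq a.toNat (-b - 1).toNat; omega
  · have hp := @Nat.xor_mod_two_eq (-a - 1).toNat b.toNat; omega
  · have hp := @Nat.xor_mod_two_eq (-a - 1).toNat (-b - 1).toNat; omega

-- invariant: parity of the XOR accumulator = parity of (start + number of odd elements seen)
theorem key (A : List Int) : ∀ (a c : Int),
    (A.foldl (fun ans i => PySem.Int.bxor ans i) a) % 2
      = (a + (A.foldl (fun odd i => if PySem.Int.band i 1 ≠ 0 then odd + 1 else odd) c - c)) % 2 := by
  induction A with
  | nil => intro a c; simp
  | cons i A ih =>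
    intro a c
    simp only [List.foldl_cons]
    rw [ih (PySem.Int.bxor a i) (if PySem.Int.band i 1 ≠ 0 then c + 1 else c)]
    have hp := bxor_par a i
    have hb := PySem.Int.band_one i
    rw [fmod_two] at hb
    split_ifs at * <;> omega

-- ===== VERDICT (by name: the statement is the Claim_ definition above) =====
theorem solve_spec : Claim_equal_solve := by
  intro A _
  unfold Spec_solve solve solve_alt
  have h := key A 0 0
  have hb := PySem.Int.band_one (A.foldl (fun ans i => PySem.Int.bxor ans i) 0)
  rw [fmod_two] at hb
  simp only [zero_add, sub_zero] at h
  simp only [hb, fmod_two, h]
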